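-- pv_equiv track=rewrite | github.com/nandinicm/IDP | att/combine_JSON.py | check_combined_coordinates
-- ===== SOURCE A (Python) =====
-- def is_coordinates_overlapping(rect1, rect2):
--     """
--     created by @amandubey on 13/11/18
--     returns if two sets of coordinates are overlapping or not
--     :param rect1: first set of coordinates
--     :param rect2: second set of coordinates
--     :return: True when two sets of coordinates are overlapping otherwise false
--     """
--     left = rect2[2] < rect1[0]
--     right = rect1[2] < rect2[0]
--     bottom = rect2[3] < rect1[1]
--     top = rect1[3] < rect2[1]
--     if top or left or bottom or right:
--         return False
--     else:  # rectangles intersect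
--         return True
--
-- def merge_coordinates(rect1, rect2):
--     """
--     created by @amandubey on 13/11/18
--     returns merged coordinates in format of [T,L,B,R] after merging two coordinates
--     :param rect1: first set of coordinates
--     :param rect2: second set of coordinates
--     :return: merged coordinates in format of [T,L,B,R]
--     """
--     t = min((rect1[0], rect2[0]))
--     l = min((rect1[1], rect2[1]))
--     b = max((rect1[2], rect2[2]))
--     r = max((rect1[3], rect2[3]))
--     return [t, l, b, r]
--
-- def check_combined_coordinates(coor_list):
--     """
--     created by @amandubey on 13/11/18
--     combines all those set of coordinates that are overlapping and returns updated list
--     :param coor_list: list of all those coordinates that belong to same page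
--     :return: updated_coor_list
--     """
--     updated_coor_list = []
--     flag = False
--     In_flag = False
--
--     for e, item in enumerate(coor_list):
--         reccur_list = list.copy(updated_coor_list)
--         if len(updated_coor_list) == 0:
--             updated_coor_list.append(item)
--         else:
--             In_flag = False
--             for new_num, new_items in enumerate(reccur_list):
--                 In_flag = is_coordinates_overlapping(new_items, item)
--                 if In_flag:
--                     flag = True
--                     coor = merge_coordinates(new_items, item)
--                     break
--             if not In_flag:
--                 updated_coor_list.append(item)
--             else:
--                 updated_coor_list[new_num][0] = coor[0]
--                 updated_coor_list[new_num][1] = coor[1]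
--                 updated_coor_list[new_num][2] = coor[2]
--                 updated_coor_list[new_num][3] = coor[3]
--
--     if flag:
--         return check_combined_coordinates(updated_coor_list)
--     else:
--         return updated_coor_list
-- ===== SOURCE B (Python) =====
-- def check_combined_coordinates(coor_list):
--     """Iteratively merge overlapping [T,L,B,R] boxes: repeat a single merge pass
--     (first overlapping accumulator entry absorbs the item) until a pass makes no
--     merge. Does not mutate the caller's inner lists."""
--     work = coor_list
--     while True:
--         merged_any = False
--         acc = []
--         for item in work:
--             i = next((k for k, r in enumerate(acc)
--                       if not (r[2] < item[0] or item[2] < r[0]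
--                               or r[3] < item[1] or item[3] < r[1])), None)
--             if i is None:
--                 acc.append(item)
--             else:
--                 r = acc[i]
--                 acc[i] = [min(r[0], item[0]), min(r[1], item[1]),
--                           max(r[2], item[2]), max(r[3], item[3])]
--                 merged_any = True
--         if not merged_any:
--             return acc
--         work = acc
-- ===== Notes on version B (the rewrite author's own statement) =====
-- stated objective: alternative
-- what changed: A's terminal self-recursion becomes an explicit fixpoint loop whose single merge pass is written functionally (first-overlap index via next/enumerate, the hit entry replaced by a freshly built merged box) instead of A's indexed scan over a per-item shallow copy with four in-place element assignments; …
-- outside the precondition, e.g. on check_combined_coordinates([[0, 0, 2, 2, 99], [1, 1, 3, 3]]): A returns [[0, 0, 3, 3, 99]], B returns [[0, 0, 3, 3]]; on check_combined_coordinates([[0, 0, 2], [1, 1, 3]]): A raises IndexError, B raises IndexError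
import Mathlib
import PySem

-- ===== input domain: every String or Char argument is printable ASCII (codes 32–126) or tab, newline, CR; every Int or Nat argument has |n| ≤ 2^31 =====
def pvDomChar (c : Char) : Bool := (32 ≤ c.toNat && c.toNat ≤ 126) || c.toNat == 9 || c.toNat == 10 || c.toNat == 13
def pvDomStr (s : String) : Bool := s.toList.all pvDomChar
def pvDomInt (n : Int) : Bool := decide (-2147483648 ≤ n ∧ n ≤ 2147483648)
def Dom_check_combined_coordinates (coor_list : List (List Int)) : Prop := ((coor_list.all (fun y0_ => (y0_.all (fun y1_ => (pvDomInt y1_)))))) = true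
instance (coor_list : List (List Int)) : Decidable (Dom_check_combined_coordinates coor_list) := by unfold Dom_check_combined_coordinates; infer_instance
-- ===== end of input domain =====

-- B replaces A's terminal self-recursion by an explicit fixpoint loop whose single pass is
-- written functionally (findIdx? / list rebuild) instead of A's indexed scan with in-place
-- element mutation; objective: alternative. Equivalence is about the RETURN value: A mutates
-- the caller's inner lists in place, B does not.

-- ===== PORT A =====
-- rect[k] for literal k ≥ 0: List.getD is exact here; a short rect makes Python raise
-- IndexError, and exactly those inputs are excluded by Pre_ below.
def aOverlap (rect1 rect2 : List Int) : Bool :=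
  let left := decide (rect2.getD 2 0 < rect1.getD 0 0)
  let right := decide (rect1.getD 2 0 < rect2.getD 0 0)
  let bottom := decide (rect2.getD 3 0 < rect1.getD 1 0)
  let top := decide (rect1.getD 3 0 < rect2.getD 1 0)
  if top || left || bottom || right then false else true

def aMerge (rect1 rect2 : List Int) : List Int :=
  [min (rect1.getD 0 0) (rect2.getD 0 0), min (rect1.getD 1 0) (rect2.getD 1 0),
   max (rect1.getD 2 0) (rect2.getD 2 0), max (rect1.getD 3 0) (rect2.getD 3 0)]

-- the inner 'for new_num, new_items in enumerate(reccur_list)' with break: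
-- returns (new_num, coor) of the first overlapping entry, none if In_flag stays False
def aInner : List (List Int) → List Int → Nat → Option (Nat × List Int)
  | [], _, _ => none
  | newItems :: rest, item, n =>
    if aOverlap newItems item then some (n, aMerge newItems item)
    else aInner rest item (n + 1)

-- updated_coor_list[new_num][0] = coor[0]; … ; updated_coor_list[new_num][3] = coor[3]
def aWrite (xs coor : List Int) : List Int :=
  (((xs.set 0 (coor.getD 0 0)).set 1 (coor.getD 1 0)).set 2 (coor.getD 2 0)).set 3 (coor.getD 3 0)

-- the outer 'for e, item in enumerate(coor_list)' threading (updated_coor_list, flag)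
def aPass : List (List Int) → List (List Int) → Bool → List (List Int) × Bool
  | [], updated, flag => (updated, flag)
  | item :: rest, updated, flag =>
    if updated.length = 0 then aPass rest (updated ++ [item]) flag
    else
      match aInner updated item 0 with
      | none => aPass rest (updated ++ [item]) flag
      | some (newNum, coor) =>
          aPass rest (updated.set newNum (aWrite (updated.getD newNum []) coor)) true

-- termination measure for A's self-recursion: a pass that set the flag merged at least once
lemma aPass_len : ∀ (rest updated : List (List Int)) (flag : Bool),
    (aPass rest updated flag).1.length + (if (aPass rest updated flag).2 then 1 else 0)
      ≤ updated.length + rest.length + (if flag then 1 else 0) := by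
  intro rest
  induction rest with
  | nil => intro updated flag; simp only [aPass]; exact le_rfl
  | cons item rest ih =>
    intro updated flag
    simp only [aPass]
    split
    · have := ih (updated ++ [item]) flag
      simp at this ⊢; omega
    · split
      · have := ih (updated ++ [item]) flag
        simp at this ⊢; omega
      · rename_i newNum coor _
        have := ih (updated.set newNum (aWrite (updated.getD newNum []) coor)) true
        simp at this ⊢; omega

def check_combined_coordinates (coor_list : List (List Int)) : List (List Int) :=
  let res := aPass coor_list [] false
  if h : res.2 = true then check_combined_coordinates res.1 else res.1
termination_by coor_list.length
decreasing_by
  have hlen := aPass_len coor_list [] false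
  have h2 : (aPass coor_list [] false).2 = true := h
  simp only [h2, if_true, List.length_nil, Bool.false_eq_true, if_false] at hlen
  omega

-- ===== PORT B =====
-- 'not (r[2] < item[0] or item[2] < r[0] or r[3] < item[1] or item[3] < r[1])'
def bOverlap (r item : List Int) : Bool :=
  !(decide (r.getD 2 0 < item.getD 0 0) || decide (item.getD 2 0 < r.getD 0 0) ||
    decide (r.getD 3 0 < item.getD 1 0) || decide (item.getD 3 0 < r.getD 1 0))

-- one loop body of B's single pass over (acc, merged_any)
def bStep (st : List (List Int) × Bool) (item : List Int) : List (List Int) × Bool :=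
  match st.1.findIdx? (fun r => bOverlap r item) with
  | some i =>
      let r := st.1.getD i []
      (st.1.set i [min (r.getD 0 0) (item.getD 0 0), min (r.getD 1 0) (item.getD 1 0),
                   max (r.getD 2 0) (item.getD 2 0), max (r.getD 3 0) (item.getD 3 0)], true)
  | none => (st.1 ++ [item], st.2)

def bPass (work : List (List Int)) : List (List Int) × Bool :=
  work.foldl bStep ([], false)

-- termination of B's 'while True' loop: a merging pass shortens the list
lemma bFold_len : ∀ (work : List (List Int)) (st : List (List Int) × Bool),
    (work.foldl bStep st).1.length + (if (work.foldl bStep st).2 then 1 else 0)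
      ≤ st.1.length + work.length + (if st.2 then 1 else 0) := by
  intro work
  induction work with
  | nil => intro st; simp only [List.foldl_nil]; exact le_rfl
  | cons item rest ih =>
    intro st
    simp only [List.foldl_cons]
    have h := ih (bStep st item)
    have hb : (bStep st item).1.length + (if (bStep st item).2 then 1 else 0)
        ≤ st.1.length + 1 + (if st.2 then 1 else 0) := by
      cases hf : st.1.findIdx? (fun r => bOverlap r item) with
      | none => simp [bStep, hf]
      | some i => simp [bStep, hf]
    simp only [List.length_cons]
    by_cases hfl : (List.foldl bStep (bStep st item) rest).2 = true <;>
      simp only [hfl, if_true] at h ⊢ <;> omega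

def check_combined_coordinates_alt (coor_list : List (List Int)) : List (List Int) :=
  let res := bPass coor_list
  if h : res.2 = true then check_combined_coordinates_alt res.1 else res.1
termination_by coor_list.length
decreasing_by
  have hlen := bFold_len coor_list ([], false)
  have h2 : (coor_list.foldl bStep ([], false)).2 = true := h
  simp only [h2, if_true, List.length_nil, Bool.false_eq_true, if_false] at hlen
  simp only [bPass]
  omega

-- ===== PRECONDITION & SPEC =====
-- Pre_ restricts to the natural domain of [T,L,B,R] quadruples: with two or more rectangles
-- A raises IndexError on a rectangle shorter than 4, and on a longer one the fate of the
-- trailing elements after a merge is unspecified (A keeps the merged-into entry's tail as an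
-- artefact of its in-place 4-index assignment, B returns clean 4-element boxes).
def Pre_check_combined_coordinates (coor_list : List (List Int)) : Prop :=
  coor_list.length ≤ 1 ∨ ∀ r ∈ coor_list, r.length = 4
instance (coor_list : List (List Int)) : Decidable (Pre_check_combined_coordinates coor_list) := by
  unfold Pre_check_combined_coordinates; infer_instance

def pvWitness_check_combined_coordinates : List (List Int) :=
  [[0, 0, 2, 2], [1, 1, 3, 3], [10, 10, 12, 12]]

def Spec_check_combined_coordinates (coor_list : List (List Int)) (out : List (List Int)) : Prop := out = check_combined_coordinates_alt coor_list
instance (coor_list : List (List Int)) (out : List (List Int)) : Decidable (Spec_check_combined_coordinates coor_list out) := by unfold Spec_check_combined_coordinates; infer_instance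

-- ===== CLAIM (what is proved, stated in full; the proofs are below) =====
def Claim_equal_check_combined_coordinates : Prop := ∀ (coor_list : List (List Int)), Dom_check_combined_coordinates coor_list → Pre_check_combined_coordinates coor_list → Spec_check_combined_coordinates coor_list (check_combined_coordinates coor_list)

-- ===== LEMMAS AND PROOFS =====

lemma overlap_eq (r item : List Int) : aOverlap r item = bOverlap r item := by
  unfold aOverlap bOverlap
  cases h1 : decide (r.getD 2 0 < item.getD 0 0) <;>
  cases h2 : decide (item.getD 2 0 < r.getD 0 0) <;>
  cases h3 : decide (r.getD 3 0 < item.getD 1 0) <;>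
  cases h4 : decide (item.getD 3 0 < r.getD 1 0) <;>
  rfl

lemma inner_eq (item : List Int) : ∀ (u : List (List Int)) (k : Nat),
    aInner u item k =
      match u.findIdx? (fun r => bOverlap r item) with
      | none => none
      | some j => some (k + j, aMerge (u.getD j []) item) := by
  intro u
  induction u with
  | nil => intro k; simp [aInner]
  | cons r rest ih =>
    intro k
    simp only [aInner, List.findIdx?_cons, overlap_eq]
    by_cases h : bOverlap r item
    · simp [h]
    · simp only [h, if_false, Bool.false_eq_true, ih (k + 1)]
      cases hf : rest.findIdx? (fun r => bOverlap r item) with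
      | none => simp
      | some j => simp only [Option.map_some, List.getD_cons_succ]; congr 2; omega

lemma write_eq (xs : List Int) (t l b r : Int) (h : xs.length = 4) :
    aWrite xs [t, l, b, r] = [t, l, b, r] := by
  match xs, h with
  | [x0, x1, x2, x3], _ => simp [aWrite]

lemma aWrite_length (xs coor : List Int) : (aWrite xs coor).length = xs.length := by
  simp [aWrite]

lemma findIdx?_lt (u : List (List Int)) (p : List Int → Bool) (j : Nat)
    (h : u.findIdx? p = some j) : j < u.length :=
  (List.findIdx?_eq_some_iff_findIdx_eq.mp h).1

lemma pass_eq : ∀ (rest u : List (List Int)) (f : Bool),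
    (∀ x ∈ u, x.length = 4) → (∀ x ∈ rest, x.length = 4) →
    aPass rest u f = rest.foldl bStep (u, f) := by
  intro rest
  induction rest with
  | nil => intro u f _ _; simp [aPass]
  | cons item rest ih =>
    intro u f hu hrest
    have hitem : item.length = 4 := hrest item (by simp)
    have hrest' : ∀ x ∈ rest, x.length = 4 := fun x hx => hrest x (by simp [hx])
    simp only [aPass, List.foldl_cons]
    rcases u with _ | ⟨u0, us⟩
    · simp only [List.length_nil, if_true, bStep, List.findIdx?_nil, List.nil_append]
      exact ih [item] f (by simpa using hitem) hrest'
    · set u := u0 :: us with hudef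
      have hlen : ¬ u.length = 0 := by simp [hudef]
      rw [if_neg hlen, inner_eq]
      cases hf : u.findIdx? (fun r => bOverlap r item) with
      | none =>
        simp only [bStep, hf]
        refine ih (u ++ [item]) f ?_ hrest'
        intro x hx
        rcases List.mem_append.mp hx with h | h
        · exact hu x h
        · simp at h; subst h; exact hitem
      | some j =>
        simp only [bStep, hf, Nat.zero_add]
        have hj : j < u.length := findIdx?_lt u _ j hf
        have hmem : u.getD j [] ∈ u := by
          rw [List.getD_eq_getElem _ _ hj]; exact List.getElem_mem hj
        have h4 : (u.getD j []).length = 4 := hu _ hmem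
        have : aWrite (u.getD j []) (aMerge (u.getD j []) item)
            = aMerge (u.getD j []) item := by
          simp only [aMerge]; exact write_eq _ _ _ _ _ h4
        rw [this]
        refine ih _ true ?_ hrest'
        intro x hx
        rcases List.mem_or_eq_of_mem_set hx with h | h
        · exact hu x h
        · subst h; simp [aMerge]

lemma pass_preserves : ∀ (rest u : List (List Int)) (f : Bool),
    (∀ x ∈ u, x.length = 4) → (∀ x ∈ rest, x.length = 4) →
    ∀ x ∈ (aPass rest u f).1, x.length = 4 := by
  intro rest
  induction rest with
  | nil => intro u f hu _; simpa [aPass] using hu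
  | cons item rest ih =>
    intro u f hu hrest
    have hitem : item.length = 4 := hrest item (by simp)
    have hrest' : ∀ x ∈ rest, x.length = 4 := fun x hx => hrest x (by simp [hx])
    have happ : ∀ x ∈ u ++ [item], x.length = 4 := by
      intro x hx; rcases List.mem_append.mp hx with h | h
      · exact hu x h
      · simp at h; subst h; exact hitem
    simp only [aPass]
    split
    · exact ih _ f happ hrest'
    · split
      · exact ih _ f happ hrest'
      · rename_i newNum coor heq
        rw [inner_eq] at heq
        refine ih _ true ?_ hrest'
        intro x hx
        rcases List.mem_or_eq_of_mem_set hx with h | h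
        · exact hu x h
        · subst h
          rw [aWrite_length]
          cases hf : u.findIdx? (fun r => bOverlap r item) with
          | none => rw [hf] at heq; exact absurd heq (by simp)
          | some j =>
            rw [hf] at heq
            have hn : newNum < u.length := by
              have := findIdx?_lt u _ j hf
              simp at heq; omega
            exact hu _ (by rw [List.getD_eq_getElem _ _ hn]; exact List.getElem_mem hn)

lemma small_eq (coor_list : List (List Int)) (h : coor_list.length ≤ 1) :
    check_combined_coordinates coor_list = check_combined_coordinates_alt coor_list := by
  rcases coor_list with _ | ⟨x, _ | ⟨y, tl⟩⟩
  · rw [check_combined_coordinates, check_combined_coordinates_alt]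
    simp [aPass, bPass]
  · rw [check_combined_coordinates, check_combined_coordinates_alt]
    simp [aPass, bPass, bStep]
  · simp at h

lemma main_eq : ∀ (n : Nat) (coor_list : List (List Int)), coor_list.length ≤ n →
    Pre_check_combined_coordinates coor_list →
    check_combined_coordinates coor_list = check_combined_coordinates_alt coor_list := by
  intro n
  induction n with
  | zero =>
    intro l hl _
    exact small_eq l (by omega)
  | succ n ih =>
    intro l hl hpre
    rcases hpre with hsmall | h4
    · exact small_eq l hsmall
    · rw [check_combined_coordinates, check_combined_coordinates_alt]
      have hpe : aPass l [] false = bPass l := by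
        rw [bPass]; exact pass_eq l [] false (by simp) h4
      rw [← hpe]
      split
      · rename_i hflag
        have hlen := aPass_len l [] false
        rw [hflag] at hlen
        simp at hlen
        have hpres := pass_preserves l [] false (by simp) h4
        exact ih _ (by omega) (Or.inr hpres)
      · rfl

-- ===== VERDICT (by name: the statement is the Claim_ definition above) =====
theorem check_combined_coordinates_spec : Claim_equal_check_combined_coordinates := by
  intro coor_list _ hpre
  unfold Spec_check_combined_coordinates
  exact main_eq coor_list.length coor_list le_rfl hpre
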